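-- pv_equiv track=rewrite | github.com/mschabhuettl/SP5ToICalExp | src/app/views.py | german_to_english_weekday
-- ===== SOURCE A (Python) =====
-- def german_to_english_weekday(date_string):
--     """Convert German weekdays to English.
--
--     Parameters:
--         date_string (str): The date string containing German weekdays.
--
--     Returns:
--         str: The date string with German weekdays converted to English.
--     """
--
--     # Mapping of German weekdays to English weekdays
--     replacements = {
--         'Mo.': 'Mon.',
--         'Di.': 'Tue.',
--         'Mi.': 'Wed.',
--         'Do.': 'Thu.',
--         'Fr.': 'Fri.',
--         'Sa.': 'Sat.',
--         'So.': 'Sun.'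
--     }
--
--     # Replace German weekdays with English weekdays
--     for german, english in replacements.items():
--         date_string = date_string.replace(german, english)
--
--     return date_string
-- ===== SOURCE B (Python) =====
-- def german_to_english_weekday(date_string):
--     """Convert German weekdays to English in one left-to-right scan."""
--     replacements = {
--         'Mo.': 'Mon.',
--         'Di.': 'Tue.',
--         'Mi.': 'Wed.',
--         'Do.': 'Thu.',
--         'Fr.': 'Fri.',
--         'Sa.': 'Sat.',
--         'So.': 'Sun.'
--     }
--     out = []
--     i = 0
--     n = len(date_string)
--     while i < n:
--         rep = replacements.get(date_string[i:i+3])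
--         if rep is not None:
--             out.append(rep)
--             i += 3
--         else:
--             out.append(date_string[i])
--             i += 1
--     return ''.join(out)
-- ===== Notes on version B (the rewrite author's own statement) =====
-- stated objective: alternative
-- what changed: Seven sequential full-string .replace passes are replaced by a single left-to-right scan that looks the 3-character window up in the replacement dict and advances by 3 on a match, by 1 otherwise.
import Mathlib
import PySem

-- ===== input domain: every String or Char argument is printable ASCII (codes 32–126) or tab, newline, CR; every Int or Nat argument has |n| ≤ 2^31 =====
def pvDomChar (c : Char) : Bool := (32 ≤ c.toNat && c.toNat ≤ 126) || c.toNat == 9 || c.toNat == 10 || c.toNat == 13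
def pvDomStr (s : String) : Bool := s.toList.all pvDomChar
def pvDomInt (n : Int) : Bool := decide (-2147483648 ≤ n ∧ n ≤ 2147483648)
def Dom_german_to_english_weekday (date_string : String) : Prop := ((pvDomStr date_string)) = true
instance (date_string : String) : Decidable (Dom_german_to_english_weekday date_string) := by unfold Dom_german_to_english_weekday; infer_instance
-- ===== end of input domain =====

-- B replaces A's seven sequential full-string .replace passes by one left-to-right
-- scan with a dict lookup on the 3-character window (objective: alternative algorithm).

-- ===== PORT A =====
def german_to_english_weekday (date_string : String) : String :=
  let replacements : PySem.Dict String String :=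
    ⟨[("Mo.", "Mon."), ("Di.", "Tue."), ("Mi.", "Wed."), ("Do.", "Thu."),
      ("Fr.", "Fri."), ("Sa.", "Sat."), ("So.", "Sun.")]⟩
  (PySem.Dict.items replacements).foldl
    (fun s p => PySem.Str.replace s p.1 p.2) date_string

-- ===== PORT B =====
-- the same replacement dict, keyed on the 3-character window (list of chars)
def pvReps : PySem.Dict (List Char) (List Char) :=
  ⟨[(['M','o','.'], ['M','o','n','.']), (['D','i','.'], ['T','u','e','.']),
    (['M','i','.'], ['W','e','d','.']), (['D','o','.'], ['T','h','u','.']),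
    (['F','r','.'], ['F','r','i','.']), (['S','a','.'], ['S','a','t','.']),
    (['S','o','.'], ['S','u','n','.'])]⟩

-- Source B's while loop: look up the window date_string[i:i+3]; on a hit emit the
-- English form and advance i by 3, otherwise emit the character and advance by 1.
def pvBScan : List Char → List Char
  | [] => []
  | c :: t =>
    match PySem.Dict.get? pvReps (List.take 3 (c :: t)) with
    | some rep => rep ++ pvBScan (List.drop 2 t)
    | none => c :: pvBScan t
termination_by s => s.length
decreasing_by
  · simp only [List.length_cons, List.length_drop]; omega
  · simp only [List.length_cons]; omega

def german_to_english_weekday_alt (date_string : String) : String :=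
  String.ofList (pvBScan date_string.toList)

-- ===== PRECONDITION & SPEC =====
def Spec_german_to_english_weekday (date_string : String) (out : String) : Prop := out = german_to_english_weekday_alt date_string
instance (date_string : String) (out : String) : Decidable (Spec_german_to_english_weekday date_string out) := by unfold Spec_german_to_english_weekday; infer_instance

-- ===== CLAIM (what is proved, stated in full; the proofs are below) =====
def Claim_equal_german_to_english_weekday : Prop := ∀ (date_string : String), Dom_german_to_english_weekday date_string → Spec_german_to_english_weekday date_string (german_to_english_weekday date_string)

-- ===== LEMMAS AND PROOFS =====

-- clean recursive form of Python str.replace for a non-empty pattern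
def pvRepl (old new : List Char) : List Char → List Char
  | [] => []
  | c :: t =>
    if old.isPrefixOf (c :: t) then new ++ pvRepl old new (List.drop (old.length - 1) t)
    else c :: pvRepl old new t
termination_by s => s.length
decreasing_by
  · simp only [List.length_cons, List.length_drop]; omega
  · simp only [List.length_cons]; omega

-- one-pass scan over an explicit token list, first match wins
def pvScan (toks : List (List Char × List Char)) : List Char → List Char
  | [] => []
  | c :: t =>
    match List.find? (fun p => p.1.isPrefixOf (c :: t)) toks with
    | some p => p.2 ++ pvScan toks (List.drop (p.1.length - 1) t)
    | none => c :: pvScan toks t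
termination_by s => s.length
decreasing_by
  · simp only [List.length_cons, List.length_drop]; omega
  · simp only [List.length_cons]; omega

lemma pvRepl_nil (old new : List Char) : pvRepl old new [] = [] := by rw [pvRepl]

lemma pvRepl_cons (old new : List Char) (c : Char) (t : List Char) :
    pvRepl old new (c :: t) =
      if old.isPrefixOf (c :: t) then new ++ pvRepl old new (List.drop (old.length - 1) t)
      else c :: pvRepl old new t := by rw [pvRepl]

lemma pvScan_nil (toks : List (List Char × List Char)) : pvScan toks [] = [] := by rw [pvScan]

lemma pvScan_cons (toks : List (List Char × List Char)) (c : Char) (t : List Char) :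
    pvScan toks (c :: t) =
      match List.find? (fun p => p.1.isPrefixOf (c :: t)) toks with
      | some p => p.2 ++ pvScan toks (List.drop (p.1.length - 1) t)
      | none => c :: pvScan toks t := by rw [pvScan]

lemma pvScan_cons_some (toks : List (List Char × List Char)) (c : Char) (t : List Char)
    (p : List Char × List Char)
    (hf : List.find? (fun p => p.1.isPrefixOf (c :: t)) toks = some p) :
    pvScan toks (c :: t) = p.2 ++ pvScan toks (List.drop (p.1.length - 1) t) := by
  rw [pvScan_cons, hf]

lemma pvScan_cons_none (toks : List (List Char × List Char)) (c : Char) (t : List Char)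
    (hf : List.find? (fun p => p.1.isPrefixOf (c :: t)) toks = none) :
    pvScan toks (c :: t) = c :: pvScan toks t := by
  rw [pvScan_cons, hf]

lemma pvBScan_nil : pvBScan [] = [] := by rw [pvBScan]

lemma pvBScan_cons (c : Char) (t : List Char) :
    pvBScan (c :: t) =
      match PySem.Dict.get? pvReps (List.take 3 (c :: t)) with
      | some rep => rep ++ pvBScan (List.drop 2 t)
      | none => c :: pvBScan t := by rw [pvBScan]

lemma pvBScan_cons_some (c : Char) (t rep : List Char)
    (hf : PySem.Dict.get? pvReps (List.take 3 (c :: t)) = some rep) :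
    pvBScan (c :: t) = rep ++ pvBScan (List.drop 2 t) := by
  rw [pvBScan_cons, hf]

lemma pvBScan_cons_none (c : Char) (t : List Char)
    (hf : PySem.Dict.get? pvReps (List.take 3 (c :: t)) = none) :
    pvBScan (c :: t) = c :: pvBScan t := by
  rw [pvBScan_cons, hf]

-- PySem.Chars.replace agrees with pvRepl for a non-empty pattern
lemma pvGo_eq (old new : List Char) (hold : old ≠ []) :
    ∀ (fuel : Nat) (l acc : List Char), l.length ≤ fuel →
      PySem.Chars.replace.go old new fuel l acc = acc.reverse ++ pvRepl old new l := by
  intro fuel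
  induction fuel with
  | zero =>
    intro l acc hl
    have hl0 : l = [] := List.eq_nil_of_length_eq_zero (Nat.le_zero.mp hl)
    subst hl0
    rw [PySem.Chars.replace.go.eq_def]
    simp [pvRepl_nil]
  | succ n IH =>
    intro l acc hl
    cases l with
    | nil =>
      rw [PySem.Chars.replace.go.eq_def]
      simp [pvRepl_nil]
    | cons c t =>
      obtain ⟨o, os, rfl⟩ : ∃ o os, old = o :: os := by
        cases old with
        | nil => exact absurd rfl hold
        | cons o os => exact ⟨o, os, rfl⟩
      rw [PySem.Chars.replace.go.eq_def]
      simp only [List.length_cons, Nat.add_le_add_iff_right] at hl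
      by_cases hp : (o :: os).isPrefixOf (c :: t) = true
      · simp only [hp, if_true]
        rw [IH (List.drop (o :: os).length (c :: t)) (new.reverse ++ acc)
            (by simp only [List.length_cons, List.length_drop]; omega)]
        rw [pvRepl_cons, if_pos hp]
        simp [List.drop_succ_cons]
      · simp only [hp]
        rw [IH t (c :: acc) (by omega)]
        rw [pvRepl_cons, if_neg hp]
        simp

lemma pvReplace_eq (old new s : List Char) (hold : old ≠ []) :
    PySem.Chars.replace s old new = pvRepl old new s := by
  rw [PySem.Chars.replace]
  rw [if_neg (by simpa [List.isEmpty_iff] using hold)]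
  simpa using pvGo_eq old new hold s.length s [] le_rfl

-- g <+: A ++ X forces a prefix relation between g and A
lemma pvPrefix_append_cases {g A X : List Char} (h : g <+: A ++ X) : A <+: g ∨ g <+: A := by
  have h1 : g = (A ++ X).take g.length := (List.prefix_iff_eq_take).mp h
  rw [List.take_append] at h1
  by_cases hle : g.length ≤ A.length
  · right
    rw [Nat.sub_eq_zero_of_le hle, List.take_zero, List.append_nil] at h1
    exact h1 ▸ List.take_prefix _ _
  · left
    have hlt : A.length ≤ g.length := le_of_not_ge hle
    rw [List.take_of_length_le hlt] at h1
    exact ⟨_, h1.symm⟩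

-- pvRepl passes over a block v none of whose suffixes interacts with the pattern
lemma pvRepl_passover (g e v : List Char)
    (h : ∀ i < v.length, ¬ (List.drop i v <+: g) ∧ ¬ (g <+: List.drop i v)) :
    ∀ X, pvRepl g e (v ++ X) = v ++ pvRepl g e X := by
  induction v with
  | nil => intro X; simp
  | cons c v IH =>
    intro X
    have h0 := h 0 (by simp)
    rw [List.cons_append, pvRepl_cons, if_neg]
    · rw [IH (fun i hi => by simpa using h (i + 1) (by simpa using Nat.succ_lt_succ hi)) X]
      simp
    · intro hcon
      rw [List.isPrefixOf_iff_prefix] at hcon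
      rw [← List.cons_append] at hcon
      rcases pvPrefix_append_cases hcon with h1 | h2
      · exact (h0.1 (by simpa using h1)).elim
      · exact (h0.2 (by simpa using h2)).elim

-- a scan output starting with g1 :: g2 comes from an input starting with g1 :: g2,
-- provided no key and no value of the scan starts with g1 or g2
lemma pvScan_starthead (toks : List (List Char × List Char)) (g1 g2 : Char)
    (Hv : ∀ p ∈ toks, p.2 ≠ [] ∧ p.2.headD ' ' ≠ g1 ∧ p.2.headD ' ' ≠ g2)
    (t r : List Char) (h : pvScan toks t = g1 :: g2 :: r) :
    ∃ r0, t = g1 :: g2 :: r0 := by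
  cases t with
  | nil => rw [pvScan_nil] at h; exact absurd h (by simp)
  | cons c t' =>
    cases hf : List.find? (fun p => p.1.isPrefixOf (c :: t')) toks with
    | some p =>
      rw [pvScan_cons_some toks c t' p hf] at h
      have hmem := List.mem_of_find?_eq_some hf
      obtain ⟨hne, hd1, hd2⟩ := Hv p hmem
      obtain ⟨v0, vs, hv⟩ : ∃ v0 vs, p.2 = v0 :: vs := by
        cases hv2 : p.2 with
        | nil => exact absurd hv2 hne
        | cons v0 vs => exact ⟨v0, vs, rfl⟩
      rw [hv] at h hd1
      have : v0 = g1 := by simpa using congrArg (List.head? ·) h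
      exact absurd this (by simpa using hd1)
    | none =>
      rw [pvScan_cons_none toks c t' hf] at h
      have hc : c = g1 := by simpa using congrArg (List.head? ·) h
      have ht : pvScan toks t' = g2 :: r := by simpa using congrArg (List.tail ·) h
      cases t' with
      | nil => rw [pvScan_nil] at ht; exact absurd ht (by simp)
      | cons c2 t'' =>
        cases hf2 : List.find? (fun p => p.1.isPrefixOf (c2 :: t'')) toks with
        | some p =>
          rw [pvScan_cons_some toks c2 t'' p hf2] at ht
          have hmem := List.mem_of_find?_eq_some hf2
          obtain ⟨hne, hd1, hd2⟩ := Hv p hmem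
          obtain ⟨v0, vs, hv⟩ : ∃ v0 vs, p.2 = v0 :: vs := by
            cases hv2 : p.2 with
            | nil => exact absurd hv2 hne
            | cons v0 vs => exact ⟨v0, vs, rfl⟩
          rw [hv] at ht hd2
          have : v0 = g2 := by simpa using congrArg (List.head? ·) ht
          exact absurd this (by simpa using hd2)
        | none =>
          rw [pvScan_cons_none toks c2 t'' hf2] at ht
          have hc2 : c2 = g2 := by simpa using congrArg (List.head? ·) ht
          exact ⟨t'', by rw [hc, hc2]⟩

-- the key step: running one replace pass after a scan = scanning with the token appended
lemma pvScan_step (toks : List (List Char × List Char)) (g0 g1 g2 : Char) (e : List Char)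
    (Hpass : ∀ p ∈ toks, ∀ i < p.2.length,
      ¬ (List.drop i p.2 <+: [g0, g1, g2]) ∧ ¬ ([g0, g1, g2] <+: List.drop i p.2))
    (Hk : ∀ p ∈ toks, p.1 ≠ [] ∧ p.1.headD ' ' ≠ g1 ∧ p.1.headD ' ' ≠ g2)
    (Hv : ∀ p ∈ toks, p.2 ≠ [] ∧ p.2.headD ' ' ≠ g1 ∧ p.2.headD ' ' ≠ g2) :
    ∀ s, pvRepl [g0, g1, g2] e (pvScan toks s) = pvScan (toks ++ [([g0, g1, g2], e)]) s := by
  suffices H : ∀ (n : Nat) (s : List Char), s.length ≤ n →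
      pvRepl [g0, g1, g2] e (pvScan toks s) = pvScan (toks ++ [([g0, g1, g2], e)]) s from
    fun s => H s.length s le_rfl
  intro n
  induction n with
  | zero =>
    intro s hs
    have hnil : s = [] := List.eq_nil_of_length_eq_zero (Nat.le_zero.mp hs)
    subst hnil
    rw [pvScan_nil, pvScan_nil, pvRepl_nil]
  | succ n IH =>
    intro s hs
    cases s with
    | nil => rw [pvScan_nil, pvScan_nil, pvRepl_nil]
    | cons c t =>
      simp only [List.length_cons, Nat.add_le_add_iff_right] at hs
      cases hf : List.find? (fun p => p.1.isPrefixOf (c :: t)) toks with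
      | some p =>
        have hf' : List.find? (fun p => p.1.isPrefixOf (c :: t)) (toks ++ [([g0, g1, g2], e)]) = some p := by
          rw [List.find?_append, hf]; rfl
        rw [pvScan_cons_some toks c t p hf, pvScan_cons_some _ c t p hf']
        rw [pvRepl_passover [g0, g1, g2] e p.2 (Hpass p (List.mem_of_find?_eq_some hf))]
        refine congrArg (p.2 ++ ·) (IH _ ?_)
        simp only [List.length_drop]; omega
      | none =>
        by_cases hg : [g0, g1, g2].isPrefixOf (c :: t) = true
        · obtain ⟨u, hu⟩ := (List.isPrefixOf_iff_prefix).mp hg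
          simp only [List.cons_append, List.nil_append] at hu
          injection hu with h1 hu
          subst h1; subst hu
          have hnone1 : List.find? (fun p => p.1.isPrefixOf (g1 :: g2 :: u)) toks = none := by
            refine List.find?_eq_none.mpr fun p hp hcon => ?_
            obtain ⟨hne, hd1, hd2⟩ := Hk p hp
            obtain ⟨k0, ks, hk⟩ : ∃ k0 ks, p.1 = k0 :: ks := by
              cases hk2 : p.1 with
              | nil => exact absurd hk2 hne
              | cons k0 ks => exact ⟨k0, ks, rfl⟩
            rw [hk] at hcon hd1
            simp only [List.isPrefixOf, Bool.and_eq_true, beq_iff_eq] at hcon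
            exact (by simpa using hd1 : k0 ≠ g1) hcon.1
          have hnone2 : List.find? (fun p => p.1.isPrefixOf (g2 :: u)) toks = none := by
            refine List.find?_eq_none.mpr fun p hp hcon => ?_
            obtain ⟨hne, hd1, hd2⟩ := Hk p hp
            obtain ⟨k0, ks, hk⟩ : ∃ k0 ks, p.1 = k0 :: ks := by
              cases hk2 : p.1 with
              | nil => exact absurd hk2 hne
              | cons k0 ks => exact ⟨k0, ks, rfl⟩
            rw [hk] at hcon hd2
            simp only [List.isPrefixOf, Bool.and_eq_true, beq_iff_eq] at hcon
            exact (by simpa using hd2 : k0 ≠ g2) hcon.1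
          have hsome : List.find? (fun p => p.1.isPrefixOf (g0 :: g1 :: g2 :: u))
              (toks ++ [([g0, g1, g2], e)]) = some ([g0, g1, g2], e) := by
            rw [List.find?_append, hf]
            simp [List.find?, List.isPrefixOf]
          rw [pvScan_cons_none toks g0 _ hf, pvScan_cons_none toks g1 _ hnone1,
            pvScan_cons_none toks g2 _ hnone2]
          rw [pvScan_cons_some _ g0 _ _ hsome]
          rw [pvRepl_cons, if_pos (by simp [List.isPrefixOf])]
          simp only [List.length_cons, List.length_nil, List.drop_succ_cons, List.drop_zero]
          refine congrArg (e ++ ·) ?_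
          have hlen : u.length ≤ n := by simp only [List.length_cons] at hs; omega
          simpa using IH u hlen
        · have hf' : List.find? (fun p => p.1.isPrefixOf (c :: t)) (toks ++ [([g0, g1, g2], e)]) = none := by
            rw [List.find?_append, hf]
            rw [Bool.not_eq_true] at hg
            simp [List.find?, hg]
          rw [pvScan_cons_none toks c t hf, pvScan_cons_none _ c t hf']
          have hng : ¬ ([g0, g1, g2].isPrefixOf (c :: pvScan toks t) = true) := by
            intro hcon
            obtain ⟨u, hu⟩ := (List.isPrefixOf_iff_prefix).mp hcon
            simp only [List.cons_append, List.nil_append] at hu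
            injection hu with h1 hu
            obtain ⟨r0, hr0⟩ := pvScan_starthead toks g1 g2 Hv t u hu.symm
            apply hg
            rw [hr0, ← h1]
            simp [List.isPrefixOf]
          rw [pvRepl_cons, if_neg hng]
          exact congrArg (c :: ·) (IH t hs)

lemma pvScan_nil_toks : ∀ s, pvScan [] s = s := by
  intro s
  induction s with
  | nil => rw [pvScan_nil]
  | cons c t IH => rw [pvScan_cons_none [] c t (by rw [List.find?_nil]), IH]

def pvToks7 : List (List Char × List Char) :=
  [(['M','o','.'], ['M','o','n','.']), (['D','i','.'], ['T','u','e','.']),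
   (['M','i','.'], ['W','e','d','.']), (['D','o','.'], ['T','h','u','.']),
   (['F','r','.'], ['F','r','i','.']), (['S','a','.'], ['S','a','t','.']),
   (['S','o','.'], ['S','u','n','.'])]

-- B's dict-window scan is the token-list scan
lemma pvFind?_congr {α : Type} (l : List α) (p q : α → Bool) (h : ∀ a ∈ l, p a = q a) :
    l.find? p = l.find? q := by
  induction l with
  | nil => rfl
  | cons a l IH =>
    rw [List.find?_cons, List.find?_cons, h a (List.mem_cons_self ..)]
    cases q a
    · exact IH fun a ha => h a (List.mem_cons_of_mem _ ha)
    · rfl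

-- B's dict-window scan is the token-list scan
lemma pvBScan_eq_pvScan : ∀ s, pvBScan s = pvScan pvToks7 s := by
  suffices H : ∀ (n : Nat) (s : List Char), s.length ≤ n → pvBScan s = pvScan pvToks7 s from
    fun s => H s.length s le_rfl
  intro n
  induction n with
  | zero =>
    intro s hs
    have hnil : s = [] := List.eq_nil_of_length_eq_zero (Nat.le_zero.mp hs)
    subst hnil
    rw [pvBScan_nil, pvScan_nil]
  | succ n IH =>
    intro s hs
    cases s with
    | nil => rw [pvBScan_nil, pvScan_nil]
    | cons c t =>
      simp only [List.length_cons, Nat.add_le_add_iff_right] at hs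
      cases t with
      | nil =>
        rw [pvBScan_cons_none c []
          (by simp [pvReps, PySem.Dict.get?, List.find?])]
        rw [pvScan_cons_none pvToks7 c []
          (by simp [pvToks7, List.find?, List.isPrefixOf])]
        rw [pvBScan_nil, pvScan_nil]
      | cons b t1 =>
        cases t1 with
        | nil =>
          rw [pvBScan_cons_none c [b]
            (by simp [pvReps, PySem.Dict.get?, List.find?])]
          rw [pvScan_cons_none pvToks7 c [b]
            (by simp [pvToks7, List.find?, List.isPrefixOf])]
          exact congrArg (c :: ·) (IH [b] (by simpa using hs))
        | cons d t2 =>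
          have htake : List.take 3 (c :: b :: d :: t2) = [c, b, d] := by simp
          have hitems : pvReps.items = pvToks7 := rfl
          have hget : PySem.Dict.get? pvReps (List.take 3 (c :: b :: d :: t2)) =
              Option.map (fun x => x.2)
                (List.find? (fun p => p.1.isPrefixOf (c :: b :: d :: t2)) pvToks7) := by
            rw [PySem.Dict.get?, htake, hitems]
            refine congrArg _ (pvFind?_congr _ _ _ fun p hp => ?_)
            fin_cases hp <;> simp [List.isPrefixOf]
          cases hf : List.find? (fun p => p.1.isPrefixOf (c :: b :: d :: t2)) pvToks7 with
          | none =>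
            rw [pvBScan_cons_none c _ (by rw [hget, hf]; rfl)]
            rw [pvScan_cons_none pvToks7 c _ hf]
            exact congrArg (c :: ·) (IH _ (by simpa using hs))
          | some p =>
            rw [pvBScan_cons_some c _ p.2 (by rw [hget, hf]; rfl)]
            rw [pvScan_cons_some pvToks7 c _ p hf]
            have hmem := List.mem_of_find?_eq_some hf
            have hlen1 : p.1.length = 3 := by fin_cases hmem <;> rfl
            rw [hlen1]
            refine congrArg (p.2 ++ ·) (IH _ ?_)
            simp only [List.length_cons] at hs
            simp only [List.length_drop, List.length_cons]
            omega

-- A's seven-pass replace chain equals B's one-pass scan, on char lists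
lemma pvChain (L : List Char) :
    PySem.Chars.replace (PySem.Chars.replace (PySem.Chars.replace (PySem.Chars.replace
      (PySem.Chars.replace (PySem.Chars.replace (PySem.Chars.replace L
        ['M','o','.'] ['M','o','n','.']) ['D','i','.'] ['T','u','e','.'])
        ['M','i','.'] ['W','e','d','.']) ['D','o','.'] ['T','h','u','.'])
        ['F','r','.'] ['F','r','i','.']) ['S','a','.'] ['S','a','t','.'])
        ['S','o','.'] ['S','u','n','.'] = pvBScan L := by
  rw [pvReplace_eq ['S','o','.'] ['S','u','n','.'] _ (by simp),
    pvReplace_eq ['S','a','.'] ['S','a','t','.'] _ (by simp),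
    pvReplace_eq ['F','r','.'] ['F','r','i','.'] _ (by simp),
    pvReplace_eq ['D','o','.'] ['T','h','u','.'] _ (by simp),
    pvReplace_eq ['M','i','.'] ['W','e','d','.'] _ (by simp),
    pvReplace_eq ['D','i','.'] ['T','u','e','.'] _ (by simp),
    pvReplace_eq ['M','o','.'] ['M','o','n','.'] _ (by simp)]
  conv_lhs => rw [← pvScan_nil_toks L]
  rw [pvScan_step [] 'M' 'o' '.' ['M','o','n','.'] (by decide) (by decide) (by decide) L]
  simp only [List.nil_append]
  rw [pvScan_step [(['M','o','.'], ['M','o','n','.'])] 'D' 'i' '.' ['T','u','e','.']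
    (by decide) (by decide) (by decide) L]
  simp only [List.cons_append, List.nil_append]
  rw [pvScan_step [(['M','o','.'], ['M','o','n','.']), (['D','i','.'], ['T','u','e','.'])]
    'M' 'i' '.' ['W','e','d','.'] (by decide) (by decide) (by decide) L]
  simp only [List.cons_append, List.nil_append]
  rw [pvScan_step [(['M','o','.'], ['M','o','n','.']), (['D','i','.'], ['T','u','e','.']),
    (['M','i','.'], ['W','e','d','.'])] 'D' 'o' '.' ['T','h','u','.']
    (by decide) (by decide) (by decide) L]
  simp only [List.cons_append, List.nil_append]
  rw [pvScan_step [(['M','o','.'], ['M','o','n','.']), (['D','i','.'], ['T','u','e','.']),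
    (['M','i','.'], ['W','e','d','.']), (['D','o','.'], ['T','h','u','.'])]
    'F' 'r' '.' ['F','r','i','.'] (by decide) (by decide) (by decide) L]
  simp only [List.cons_append, List.nil_append]
  rw [pvScan_step [(['M','o','.'], ['M','o','n','.']), (['D','i','.'], ['T','u','e','.']),
    (['M','i','.'], ['W','e','d','.']), (['D','o','.'], ['T','h','u','.']),
    (['F','r','.'], ['F','r','i','.'])] 'S' 'a' '.' ['S','a','t','.']
    (by decide) (by decide) (by decide) L]
  simp only [List.cons_append, List.nil_append]
  rw [pvScan_step [(['M','o','.'], ['M','o','n','.']), (['D','i','.'], ['T','u','e','.']),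
    (['M','i','.'], ['W','e','d','.']), (['D','o','.'], ['T','h','u','.']),
    (['F','r','.'], ['F','r','i','.']), (['S','a','.'], ['S','a','t','.'])]
    'S' 'o' '.' ['S','u','n','.'] (by decide) (by decide) (by decide) L]
  simp only [List.cons_append, List.nil_append]
  exact (pvBScan_eq_pvScan L).symm

-- ===== VERDICT (by name: the statement is the Claim_ definition above) =====
theorem german_to_english_weekday_spec : Claim_equal_german_to_english_weekday := by
  intro s _
  show german_to_english_weekday s = german_to_english_weekday_alt s
  unfold german_to_english_weekday german_to_english_weekday_alt
  simp only [List.foldl_cons, List.foldl_nil, PySem.Str.replace,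
    String.toList_ofList]
  exact congrArg String.ofList (by simpa using pvChain s.toList)
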